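-- pv_equiv track=rewrite | github.com/shivam-vishwakarmaa/riftt | rift/pharma_guard/parser.py | get_diplotype
-- ===== SOURCE A (Python) =====
-- from typing import List, Dict, Any
--
-- def get_variants_by_gene(variants: List[Dict], gene: str) -> List[Dict]:
--     """Filter variants by gene"""
--     return [v for v in variants if v["gene"] == gene]
--
-- def get_diplotype(variants: List[Dict], gene: str) -> str:
--     """
--     Determine diplotype for a gene based on variants.
--     Fixed version - correctly handles homozygous variants.
--     """
--     gene_variants = get_variants_by_gene(variants, gene)
--
--     if not gene_variants:
--         return "*1/*1"  # Default wild type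
--
--     # Collect all alleles
--     alleles = []
--     for v in gene_variants:
--         if v["genotype"] in ["1/1", "1|1"]:
--             # Homozygous variant - two copies of the variant allele
--             alleles.append(v["allele"])
--             alleles.append(v["allele"])
--         elif v["genotype"] in ["0/1", "1/0", "0|1", "1|0"]:
--             # Heterozygous - one wild type, one variant
--             alleles.append("*1")
--             alleles.append(v["allele"])
--         elif v["genotype"] in ["0/0", "0|0"]:
--             # Homozygous reference - two wild type copies
--             alleles.append("*1")
--             alleles.append("*1")
--
--     # If we have alleles, return the first two (simplified for hackathon)
--     if len(alleles) >= 2: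
--         # Sort to ensure consistent representation (*1/*2 not *2/*1)
--         sorted_alleles = sorted(alleles[:2], key=lambda x: (x == "*1", x))
--         return f"{sorted_alleles[0]}/{sorted_alleles[1]}"
--
--     return "*1/*1"
-- ===== SOURCE B (Python) =====
-- def get_diplotype(variants, gene):
--     """Single pass: the first variant of the gene with a recognized genotype
--     decides the diplotype directly, with no allele accumulation or sorting."""
--     for v in variants:
--         if v["gene"] != gene:
--             continue
--         g = v["genotype"]
--         if g in ("1/1", "1|1"):
--             a = v["allele"]
--             return f"{a}/{a}"
--         if g in ("0/1", "1/0", "0|1", "1|0"):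
--             a = v["allele"]
--             return f"{a}/*1"
--         if g in ("0/0", "0|0"):
--             return "*1/*1"
--     return "*1/*1"
-- ===== Notes on version B (the rewrite author's own statement) =====
-- stated objective: simpler
-- what changed: B replaces A's filter-then-accumulate-all-alleles-then-sort-then-take-two pipeline by a single early-returning pass that formats the diplotype directly from the first variant of the gene with a recognized genotype, with no allele list and no sort.
import Mathlib
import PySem

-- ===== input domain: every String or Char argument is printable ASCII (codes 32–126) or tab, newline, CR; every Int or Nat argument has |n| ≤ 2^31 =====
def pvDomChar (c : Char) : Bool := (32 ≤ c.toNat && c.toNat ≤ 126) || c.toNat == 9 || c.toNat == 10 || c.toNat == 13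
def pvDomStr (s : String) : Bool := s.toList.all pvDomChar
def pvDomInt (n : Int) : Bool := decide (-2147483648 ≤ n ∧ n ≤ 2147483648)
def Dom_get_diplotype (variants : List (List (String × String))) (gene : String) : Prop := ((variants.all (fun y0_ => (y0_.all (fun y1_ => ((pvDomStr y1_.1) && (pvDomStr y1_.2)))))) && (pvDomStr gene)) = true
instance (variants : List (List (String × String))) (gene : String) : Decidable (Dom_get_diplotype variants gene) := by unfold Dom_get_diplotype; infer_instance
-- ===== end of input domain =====

-- B replaces A's accumulate-all-alleles-then-sort pass by a single loop that returns
-- the diplotype directly from the first gene variant with a recognized genotype (objective: simpler).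


-- ===== PORT A =====
-- dicts are association lists; v["k"] is first-match lookup (List.lookup), with default ""
-- only on inputs Pre_ excludes (where Python raises KeyError).
def get_diplotype (variants : List (List (String × String))) (gene : String) : String :=
  -- get_variants_by_gene inlined as the filter comprehension it is
  let gene_variants := variants.filter (fun v => (List.lookup "gene" v).getD "" == gene)
  if gene_variants.isEmpty then "*1/*1"
  else
    let alleles := gene_variants.foldl (fun acc v =>
      let g := (List.lookup "genotype" v).getD ""
      if g == "1/1" || g == "1|1" then
        (acc ++ [(List.lookup "allele" v).getD ""]) ++ [(List.lookup "allele" v).getD ""]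
      else if g == "0/1" || g == "1/0" || g == "0|1" || g == "1|0" then
        (acc ++ ["*1"]) ++ [(List.lookup "allele" v).getD ""]
      else if g == "0/0" || g == "0|0" then
        (acc ++ ["*1"]) ++ ["*1"]
      else acc) ([] : List String)
    if 2 ≤ alleles.length then
      let sorted_alleles := PySem.List.sorted2 (PySem.List.slice alleles none (some 2))
        (fun x => x == "*1") (fun x => x) false
      -- indices 0 and 1 are in range here (the guard gives length ≥ 2), so getD is exact
      sorted_alleles.getD 0 "" ++ "/" ++ sorted_alleles.getD 1 ""
    else "*1/*1"

-- ===== PORT B =====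
def get_diplotype_alt (variants : List (List (String × String))) (gene : String) : String :=
  match variants with
  | [] => "*1/*1"
  | v :: rest =>
    if (List.lookup "gene" v).getD "" != gene then get_diplotype_alt rest gene
    else
      let g := (List.lookup "genotype" v).getD ""
      if g == "1/1" || g == "1|1" then
        let a := (List.lookup "allele" v).getD ""
        a ++ "/" ++ a
      else if g == "0/1" || g == "1/0" || g == "0|1" || g == "1|0" then
        let a := (List.lookup "allele" v).getD ""
        a ++ "/*1"
      else if g == "0/0" || g == "0|0" then "*1/*1"
      else get_diplotype_alt rest gene

-- ===== PRECONDITION & SPEC =====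
-- Pre_ excludes exactly the inputs where Python A raises KeyError: a variant without a
-- "gene" key, a gene-matching variant without a "genotype" key, or a gene-matching variant
-- whose genotype is homozygous-variant or heterozygous but has no "allele" key.
def Pre_get_diplotype (variants : List (List (String × String))) (gene : String) : Prop :=
  ∀ v ∈ variants,
    (List.lookup "gene" v).isSome ∧
    ((List.lookup "gene" v).getD "" = gene →
      (List.lookup "genotype" v).isSome ∧
      (((List.lookup "genotype" v).getD "") ∈
          (["1/1", "1|1", "0/1", "1/0", "0|1", "1|0"] : List String) →
        (List.lookup "allele" v).isSome))
instance (variants : List (List (String × String))) (gene : String) : Decidable (Pre_get_diplotype variants gene) := by unfold Pre_get_diplotype; infer_instance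

def pvWitness_get_diplotype : (List (List (String × String))) × String :=
  ([[("gene", "CYP2D6"), ("genotype", "0/1"), ("allele", "*4")],
    [("gene", "OTHER"), ("genotype", "1/1")]], "CYP2D6")

def Spec_get_diplotype (variants : List (List (String × String))) (gene : String) (out : String) : Prop := out = get_diplotype_alt variants gene
instance (variants : List (List (String × String))) (gene : String) (out : String) : Decidable (Spec_get_diplotype variants gene out) := by unfold Spec_get_diplotype; infer_instance

-- ===== CLAIM (what is proved, stated in full; the proofs are below) =====
def Claim_equal_get_diplotype : Prop := ∀ (variants : List (List (String × String))) (gene : String), Dom_get_diplotype variants gene → Pre_get_diplotype variants gene → Spec_get_diplotype variants gene (get_diplotype variants gene)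

-- ===== LEMMAS AND PROOFS =====

-- per-variant allele contribution of A's loop body
def pvContrib (v : List (String × String)) : List String :=
  let g := (List.lookup "genotype" v).getD ""
  if g == "1/1" || g == "1|1" then
    [(List.lookup "allele" v).getD "", (List.lookup "allele" v).getD ""]
  else if g == "0/1" || g == "1/0" || g == "0|1" || g == "1|0" then
    ["*1", (List.lookup "allele" v).getD ""]
  else if g == "0/0" || g == "0|0" then ["*1", "*1"]
  else []

-- A's tail after the allele list is built
def pvFmt (alleles : List String) : String :=
  if 2 ≤ alleles.length then
    let s := PySem.List.sorted2 (alleles.take 2) (fun x => x == "*1") (fun x => x) false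
    s.getD 0 "" ++ "/" ++ s.getD 1 ""
  else "*1/*1"

lemma pvSlice2 (xs : List String) : PySem.List.slice xs none (some 2) = xs.take 2 := by
  simp [PySem.List.slice, PySem.List.clampIdx]

lemma pvGet_A_eq (variants : List (List (String × String))) (gene : String) :
    get_diplotype variants gene =
      pvFmt ((variants.filter (fun v => (List.lookup "gene" v).getD "" == gene)).flatMap pvContrib) := by
  unfold get_diplotype
  set l := variants.filter (fun v => (List.lookup "gene" v).getD "" == gene) with hl
  by_cases h : l.isEmpty
  · simp only [h, if_true]
    rw [List.isEmpty_iff] at h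
    simp [h, pvFmt]
  · simp only [h, Bool.false_eq_true, if_false]
    have hfun : ∀ (acc : List String) (v : List (String × String)), v ∈ l →
        (fun (acc : List String) (v : List (String × String)) =>
          if ((List.lookup "genotype" v).getD "" == "1/1" || (List.lookup "genotype" v).getD "" == "1|1") then
            (acc ++ [(List.lookup "allele" v).getD ""]) ++ [(List.lookup "allele" v).getD ""]
          else if ((List.lookup "genotype" v).getD "" == "0/1" || (List.lookup "genotype" v).getD "" == "1/0" ||
              (List.lookup "genotype" v).getD "" == "0|1" || (List.lookup "genotype" v).getD "" == "1|0") then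
            (acc ++ ["*1"]) ++ [(List.lookup "allele" v).getD ""]
          else if ((List.lookup "genotype" v).getD "" == "0/0" || (List.lookup "genotype" v).getD "" == "0|0") then
            (acc ++ ["*1"]) ++ ["*1"]
          else acc) acc v = acc ++ pvContrib v := by
      intro acc v _
      simp only [pvContrib]
      split_ifs <;> simp
    rw [PySem.List.foldl_congr_mem _ _ _ _ hfun,
      show l.foldl (fun acc v => acc ++ pvContrib v) ([] : List String) = l.flatMap pvContrib by
        simpa using PySem.List.foldl_append_eq_flatMap pvContrib l ([] : List String),
      pvSlice2]
    rfl

-- pvFmt on a list starting with one variant's two alleles, per branch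
lemma pvFmt_pair (x y : String) (t : List String) :
    pvFmt (x :: y :: t) =
      (PySem.List.sorted2 [x, y] (fun z => z == "*1") (fun z => z) false).getD 0 "" ++ "/" ++
      (PySem.List.sorted2 [x, y] (fun z => z == "*1") (fun z => z) false).getD 1 "" := by
  simp [pvFmt]

lemma pvSorted2_pair_same (a : String) :
    PySem.List.sorted2 [a, a] (fun z => z == "*1") (fun z => z) false = [a, a] := by
  simp [PySem.List.sorted2, PySem.List.insertBy]

lemma pvSorted2_pair_het (a : String) :
    (PySem.List.sorted2 ["*1", a] (fun z => z == "*1") (fun z => z) false).getD 0 "" ++ "/" ++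
    (PySem.List.sorted2 ["*1", a] (fun z => z == "*1") (fun z => z) false).getD 1 "" = a ++ "/*1" := by
  by_cases h : a = "*1"
  · subst h
    rw [pvSorted2_pair_same]
    simp
  · have : PySem.List.sorted2 ["*1", a] (fun z => z == "*1") (fun z => z) false = [a, "*1"] := by
      simp [PySem.List.sorted2, PySem.List.insertBy, h, Bool.lt_iff]
    rw [this]
    simp [String.append_assoc]

lemma pvMain (variants : List (List (String × String))) (gene : String) :
    pvFmt ((variants.filter (fun v => (List.lookup "gene" v).getD "" == gene)).flatMap pvContrib) =
      get_diplotype_alt variants gene := by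
  induction variants with
  | nil => simp [pvFmt, get_diplotype_alt]
  | cons v rest ih =>
    by_cases hm : ((List.lookup "gene" v).getD "" == gene) = true
    · simp only [List.filter_cons, hm, if_true]
      unfold get_diplotype_alt
      rw [show ((List.lookup "gene" v).getD "" != gene) = false by simp [bne, hm]]
      simp only [Bool.false_eq_true, if_false, List.flatMap_cons, pvContrib]
      split_ifs with h1 h2 h3
      · simp only [List.cons_append, List.nil_append]
        rw [pvFmt_pair, pvSorted2_pair_same]
        simp
      · simp only [List.cons_append, List.nil_append]
        rw [pvFmt_pair, pvSorted2_pair_het]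
      · simp only [List.cons_append, List.nil_append]
        rw [pvFmt_pair, pvSorted2_pair_same]
        simp only [List.getD_cons_zero, List.getD_cons_succ]
        rfl
      · simpa using ih
    · have hm' : ((List.lookup "gene" v).getD "" == gene) = false := by simpa using hm
      simp only [List.filter_cons, hm', Bool.false_eq_true, if_false]
      unfold get_diplotype_alt
      rw [show ((List.lookup "gene" v).getD "" != gene) = true by simp [bne, hm']]
      simp only [if_true]
      exact ih

-- ===== VERDICT (by name: the statement is the Claim_ definition above) =====
theorem get_diplotype_spec : Claim_equal_get_diplotype := by
  intro variants gene _ _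
  unfold Spec_get_diplotype
  rw [pvGet_A_eq, pvMain]
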